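-- pv_equiv track=rewrite | github.com/jakobkhansen/KattisSolutions | conundrum/conundrum.py | conundrum
-- ===== SOURCE A (Python) =====
-- def conundrum(lines):
--     cypher = "PER"
--     inputStr = lines[0]
--
--     numChanges = 0
--     for i, char in enumerate(inputStr):
--         if char != cypher[i % len(cypher)]:
--             numChanges += 1
--
--     return numChanges
-- ===== SOURCE B (Python) =====
-- def conundrum(lines):
--     cypher = "PER"
--     inputStr = lines[0]
--     numChanges = 0
--     for j in range(len(cypher)):
--         col = inputStr[j::3]
--         numChanges += len(col) - col.count(cypher[j])
--     return numChanges
-- ===== Notes on version B (the rewrite author's own statement) =====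
-- stated objective: alternative
-- what changed: B replaces A's per-character loop with mod-3 indexing by three column-wise passes: for each cypher position j it takes the strided slice inputStr[j::3] and adds len(slice) - slice.count(cypher[j]).
import Mathlib
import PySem

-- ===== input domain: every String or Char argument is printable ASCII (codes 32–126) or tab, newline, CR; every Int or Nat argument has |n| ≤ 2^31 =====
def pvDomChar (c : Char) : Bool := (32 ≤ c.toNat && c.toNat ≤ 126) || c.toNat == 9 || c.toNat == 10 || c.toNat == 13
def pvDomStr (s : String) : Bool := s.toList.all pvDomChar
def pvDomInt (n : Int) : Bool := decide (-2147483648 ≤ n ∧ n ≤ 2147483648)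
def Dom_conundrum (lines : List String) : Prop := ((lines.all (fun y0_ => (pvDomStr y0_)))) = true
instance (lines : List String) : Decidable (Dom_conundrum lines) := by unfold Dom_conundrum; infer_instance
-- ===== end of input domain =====

-- B counts mismatches column-wise: for each cypher position j it takes the strided
-- slice inputStr[j::3] and adds len(slice) - slice.count(cypher[j]), instead of A's
-- per-character loop indexing the cypher with i % 3 (objective: alternative).


-- ===== PORT A =====
def conundrum (lines : List String) : Int :=
  let cypher := "PER"
  let inputStr := PySem.List.pyGetD lines 0 ""
  (PySem.List.enumerate inputStr.toList 0).foldl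
    (fun numChanges ic =>
      if ic.2 ≠ PySem.List.pyGetD cypher.toList (PySem.Int.mod ic.1 (PySem.Str.len cypher)) ' '
      then numChanges + 1 else numChanges) 0

-- ===== PORT B =====
-- str.count of a single character equals counting that character's occurrences,
-- so col.count(cypher[j]) is ported as List.count over the slice's characters.
def conundrum_alt (lines : List String) : Int :=
  let cypher := "PER"
  let inputStr := PySem.List.pyGetD lines 0 ""
  (PySem.List.pyRange 0 (PySem.Str.len cypher) 1).foldl
    (fun numChanges j =>
      let col := (PySem.List.slice? inputStr.toList (some j) none 3).getD []
      numChanges + ((col.length : Int)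
        - (col.count (PySem.List.pyGetD cypher.toList j ' ') : Int))) 0

-- ===== PRECONDITION & SPEC =====
-- Pre_ excludes only the empty list, on which Python A raises IndexError at lines[0].
def Pre_conundrum (lines : List String) : Prop := lines ≠ []
instance (lines : List String) : Decidable (Pre_conundrum lines) := by unfold Pre_conundrum; infer_instance
def pvWitness_conundrum : List String := ["PESPPR"]
def Spec_conundrum (lines : List String) (out : Int) : Prop := out = conundrum_alt lines
instance (lines : List String) (out : Int) : Decidable (Spec_conundrum lines out) := by unfold Spec_conundrum; infer_instance

-- ===== CLAIM (what is proved, stated in full; the proofs are below) =====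
def Claim_equal_conundrum : Prop := ∀ (lines : List String), Dom_conundrum lines → Pre_conundrum lines → Spec_conundrum lines (conundrum lines)

-- ===== LEMMAS AND PROOFS =====

-- reference count: mismatches of cs against pattern position s, s+1, … (mod 3)
def cntMis : List Char → Nat → Int
  | [], _ => 0
  | c :: t, s => (if c ≠ ['P','E','R'].getD (s % 3) ' ' then 1 else 0) + cntMis t (s + 1)

-- every third element of a list, starting with its head
def strided3 : List Char → List Char
  | [] => []
  | c :: t => c :: strided3 (t.drop 2)
termination_by l => l.length
decreasing_by simp

@[simp] lemma strided3_nil : strided3 [] = [] := by rw [strided3.eq_def]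
@[simp] lemma strided3_cons (c : Char) (t : List Char) :
    strided3 (c :: t) = c :: strided3 (t.drop 2) := by rw [strided3.eq_def]

-- mismatch count of one column against its pattern letter
def colMis (p : Char) (l : List Char) : Int := (l.length : Int) - (l.count p : Int)

lemma cntMis_shift (cs : List Char) (s : Nat) : cntMis cs (s + 3) = cntMis cs s := by
  induction cs generalizing s with
  | nil => rfl
  | cons c t ih =>
      simp only [cntMis, Nat.add_mod_right]
      rw [show s + 3 + 1 = (s + 1) + 3 from by omega, ih]

lemma foldlA_eq_cntMis (cs : List Char) (s : Nat) (n : Int) :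
    (PySem.List.enumerate cs (s : Int)).foldl
      (fun numChanges ic =>
        if ic.2 ≠ PySem.List.pyGetD ['P','E','R'] (PySem.Int.mod ic.1 3) ' '
        then numChanges + 1 else numChanges) n = n + cntMis cs s := by
  induction cs generalizing s n with
  | nil => simp [PySem.List.enumerate_nil, cntMis]
  | cons c t ih =>
      rw [PySem.List.enumerate_cons]
      simp only [List.foldl_cons]
      have hmod : PySem.Int.mod (s : Int) 3 = ((s % 3 : Nat) : Int) :=
        PySem.Int.mod_natCast s 3
      rw [show ((s : Int) + 1) = ((s + 1 : Nat) : Int) from by push_cast; ring, ih]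
      simp only [hmod, PySem.List.pyGetD_natCast, cntMis]
      split_ifs <;> ring

lemma colMis_cons (p c : Char) (l : List Char) :
    colMis p (c :: l) = colMis p l + (if c ≠ p then 1 else 0) := by
  simp only [colMis, List.length_cons, List.count_cons]
  by_cases h : c = p
  · simp [h]
  · simp only [h, beq_iff_eq, if_false, ite_not, Nat.cast_add]
    push_cast
    ring

-- cntMis decomposes into the three column mismatch counts
lemma cntMis_eq_cols (m : Nat) (cs : List Char) (h : cs.length ≤ 3 * m) :
    cntMis cs 0 = colMis 'P' (strided3 cs) + colMis 'E' (strided3 (cs.drop 1))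
      + colMis 'R' (strided3 (cs.drop 2)) := by
  induction m generalizing cs with
  | zero =>
      rw [Nat.le_zero] at h
      rw [List.length_eq_zero_iff.mp h]
      simp [cntMis, colMis]
  | succ m ih =>
      match cs with
      | [] => simp [cntMis, colMis]
      | [a] =>
          simp [cntMis, colMis]
          split_ifs <;> simp_all
      | [a, b] =>
          simp [cntMis, colMis]
          split_ifs <;> simp_all
      | a :: b :: c :: t =>
          have ht : t.length ≤ 3 * m := by simp at h; omega
          have h3 : cntMis t (0 + 1 + 1 + 1) = cntMis t 0 := by
            simpa using cntMis_shift t 0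
          simp only [cntMis, h3, List.drop_succ_cons, List.drop_zero]
          rw [show strided3 (a :: b :: c :: t) = a :: strided3 t from by simp,
              show strided3 (b :: c :: t) = b :: strided3 (t.drop 1) from by simp,
              show strided3 (c :: t) = c :: strided3 (t.drop 2) from by simp,
              colMis_cons, colMis_cons, colMis_cons, ih t ht]
          simp only [List.getD]
          norm_num
          split_ifs <;> ring

-- core: Python's filterMap-over-range form of a step-3 slice is strided3
lemma filterMap_eq_strided3 (m : Nat) (l : List Char) (h : l.length ≤ 3 * m) :
    List.filterMap (fun k => l[3 * k]?) (List.range ((l.length + 2) / 3)) = strided3 l := by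
  induction m generalizing l with
  | zero =>
      rw [Nat.le_zero] at h
      rw [List.length_eq_zero_iff.mp h]
      simp
  | succ m ih =>
      match l with
      | [] => simp
      | c :: t =>
          have hn : (( (c :: t).length + 2) / 3) = ((t.drop 2).length + 2) / 3 + 1 := by
            simp [List.length_drop]; omega
          rw [hn, List.range_succ_eq_map, List.filterMap_cons, List.filterMap_map, strided3_cons]
          have h0 : (c :: t)[3 * 0]? = some c := by simp
          simp only [h0]
          congr 1
          have hd : t.drop 2 = (c :: t).drop 3 := by simp
          have ht : (t.drop 2).length ≤ 3 * m := by simp [List.length_drop] at h ⊢; omega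
          rw [← ih (t.drop 2) ht]
          apply List.filterMap_congr
          intro k _
          have h3k : (3 : Nat) * Nat.succ k = 3 + 3 * k := by omega
          simp only [Function.comp_apply, h3k, hd, List.getElem?_drop]

-- a step-3 slice starting at a natural index is strided3 of the dropped list
lemma slice?_three (cs : List Char) (j : Nat) :
    PySem.List.slice? cs (some (j : Int)) none 3 = some (strided3 (cs.drop j)) := by
  have hj0 : ¬ ((j : Int) < 0) := by omega
  unfold PySem.List.slice? PySem.List.sliceIndices
  norm_num [hj0]
  by_cases h : cs.length ≤ j
  · have hmin : min (j : Int) (cs.length : Int) = (cs.length : Int) := by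
      simp; exact_mod_cast h
    have hdrop : cs.drop j = [] := List.drop_eq_nil_of_le h
    rw [hmin, hdrop]
    simp
  · have hmin : min (j : Int) (cs.length : Int) = (j : Int) := by
      simp; omega
    rw [hmin, if_pos (show j < cs.length by omega)]
    have hcount : (((cs.length : Int) - (j : Int) + 3 - 1) / 3).toNat
        = ((cs.drop j).length + 2) / 3 := by
      have h2 : ((cs.length : Int) - (j : Int) + 3 - 1) = (((cs.length - j) + 2 : Nat) : Int) := by
        push_cast; omega
      rw [h2, show (3 : Int) = ((3 : Nat) : Int) from rfl, ← Int.natCast_div,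
        Int.toNat_natCast, List.length_drop]
    rw [hcount, ← filterMap_eq_strided3 (cs.drop j).length (cs.drop j) (by omega)]
    apply List.filterMap_congr
    intro k _
    have h1 : ((j : Int) + 3 * (k : Int)).toNat = j + 3 * k := by omega
    rw [h1, ← List.getElem?_drop]

theorem conundrum_spec : Claim_equal_conundrum := by
  intro lines _ _
  unfold Spec_conundrum conundrum conundrum_alt
  simp only [show ("PER".toList : List Char) = ['P','E','R'] from rfl,
    show (PySem.Str.len "PER") = (3 : Int) from rfl]
  set cs := (PySem.List.pyGetD lines 0 "").toList with hcs
  have hA := foldlA_eq_cntMis cs 0 0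
  simp only [Nat.cast_zero] at hA
  rw [hA]
  have hr : PySem.List.pyRange 0 3 1 = [0, 1, 2] := by decide
  have hs0 : PySem.List.slice? cs (some (0 : Int)) none 3 = some (strided3 cs) := by
    simpa using slice?_three cs 0
  have hs1 : PySem.List.slice? cs (some (1 : Int)) none 3 = some (strided3 (cs.drop 1)) := by
    simpa using slice?_three cs 1
  have hs2 : PySem.List.slice? cs (some (2 : Int)) none 3 = some (strided3 (cs.drop 2)) := by
    simpa using slice?_three cs 2
  rw [hr]
  simp only [List.foldl_cons, List.foldl_nil, hs0, hs1, hs2, Option.getD_some,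
    show PySem.List.pyGetD ['P','E','R'] 0 ' ' = 'P' from rfl,
    show PySem.List.pyGetD ['P','E','R'] 1 ' ' = 'E' from rfl,
    show PySem.List.pyGetD ['P','E','R'] 2 ' ' = 'R' from rfl]
  rw [cntMis_eq_cols cs.length cs (by omega)]
  unfold colMis
  ring
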